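-- pv_equiv track=rewrite | github.com/ayoubabounakif/edX-Python | find_a_word_in_a_crossword_vertical.py | find_word_vertical
-- ===== SOURCE A (Python) =====
-- def find_word_vertical(crosswords,word):
--     if not crosswords or not word:
--         return None
--     for col_index in range(len(crosswords[0])):
--         str = ''
--         for row_index in range(len(crosswords)):
--             str = str + crosswords[row_index][col_index]
--         if str.find(word) >= 0:
--             return [str.find(word), col_index]
-- ===== SOURCE B (Python) =====
-- def find_word_vertical(crosswords, word):
--     if not crosswords or not word:
--         return None
--     wl = list(word)
--     n = len(wl)
--     for col in range(len(crosswords[0])):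
--         chars = []
--         for row in crosswords:
--             chars.extend(row[col])
--         for start in range(len(chars) - n + 1):
--             if all(chars[start + i] == wl[i] for i in range(n)):
--                 return [start, col]
--     return None
-- ===== Notes on version B (the rewrite author's own statement) =====
-- stated objective: alternative
-- what changed: B drops the column-string concatenation and the two str.find calls: it flattens each column's cell characters into a list once and runs an explicit leftmost char-by-char start scan, returning the first matching [start, col].
-- outside the precondition, e.g. on find_word_vertical([['a', 'b'], ['a']], 'a'): A returns [0, 0], B returns [0, 0]
import Mathlib
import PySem

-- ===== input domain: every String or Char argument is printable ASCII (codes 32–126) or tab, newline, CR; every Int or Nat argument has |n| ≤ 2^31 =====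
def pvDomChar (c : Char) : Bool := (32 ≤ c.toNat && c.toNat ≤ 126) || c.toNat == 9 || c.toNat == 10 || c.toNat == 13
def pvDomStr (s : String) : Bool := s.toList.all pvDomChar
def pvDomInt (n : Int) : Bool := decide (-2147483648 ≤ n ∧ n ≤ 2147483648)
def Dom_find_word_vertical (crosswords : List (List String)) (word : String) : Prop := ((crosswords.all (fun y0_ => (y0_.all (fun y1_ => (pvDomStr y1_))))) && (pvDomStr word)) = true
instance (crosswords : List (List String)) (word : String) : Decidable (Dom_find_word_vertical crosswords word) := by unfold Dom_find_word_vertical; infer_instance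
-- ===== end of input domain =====

-- B replaces the column-string build + double str.find call by an explicit leftmost
-- char-by-char scan over the flattened column characters (alternative decomposition, same cost).

-- ===== PORT A =====
-- str = ''; for row_index in range(len(crosswords)): str = str + crosswords[row_index][col_index]
-- (out-of-range indexing raises in Python; here .getD supplies a dummy, excluded by Pre_)
def aColStr (cw : List (List String)) (c : Int) : String :=
  (PySem.List.pyRange 0 (cw.length : Int) 1).foldl
    (fun s r => s ++ (PySem.List.pyGet? (PySem.List.pyGetD cw r []) c).getD "") ""

-- the 'for col_index in range(len(crosswords[0]))' loop with its early return
def aCols (cw : List (List String)) (word : String) : List Int → Option (List Int)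
  | [] => none
  | c :: rest =>
      if 0 ≤ PySem.Str.find (aColStr cw c) word then
        some [PySem.Str.find (aColStr cw c) word, c]
      else aCols cw word rest

def find_word_vertical (crosswords : List (List String)) (word : String) : Option (List Int) :=
  if crosswords = [] ∨ word = "" then none
  else aCols crosswords word
    (PySem.List.pyRange 0 (((PySem.List.pyGetD crosswords 0 []).length : Int)) 1)

-- ===== PORT B =====
-- all(chars[start + i] == wl[i] for i in range(n))
def bMatch (chars wl : List Char) (s : Int) : Bool :=
  (PySem.List.pyRange 0 (wl.length : Int) 1).all
    (fun i => (PySem.List.pyGet? chars (s + i)).getD ' ' == (PySem.List.pyGet? wl i).getD ' ')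

-- the 'for start in range(len(chars) - n + 1)' loop with its early return
def bStarts (chars wl : List Char) : List Int → Option Int
  | [] => none
  | s :: rest => if bMatch chars wl s then some s else bStarts chars wl rest

-- the outer 'for col in range(len(crosswords[0]))' loop
def altCols (cw : List (List String)) (wl : List Char) : List Int → Option (List Int)
  | [] => none
  | c :: rest =>
      let chars := cw.foldl (fun acc row => acc ++ ((PySem.List.pyGet? row c).getD "").toList) []
      match bStarts chars wl (PySem.List.pyRange 0 ((chars.length : Int) - wl.length + 1) 1) with
      | some s => some [s, c]
      | none => altCols cw wl rest

def find_word_vertical_alt (crosswords : List (List String)) (word : String) : Option (List Int) :=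
  if crosswords = [] ∨ word = "" then none
  else altCols crosswords word.toList
    (PySem.List.pyRange 0 (((PySem.List.pyGetD crosswords 0 []).length : Int)) 1)

-- ===== PRECONDITION & SPEC =====
-- Pre_ excludes ragged grids in which some row is shorter than the first row: there the
-- Python indexing crosswords[row][col] can raise IndexError (it also excludes a few ragged
-- grids on which A happens to return early before reaching the short row; both programs
-- agree there too — see the cite in claim.json).
def Pre_find_word_vertical (crosswords : List (List String)) (word : String) : Prop :=
  crosswords = [] ∨ word = "" ∨
    ∀ row ∈ crosswords, (crosswords.headD []).length ≤ row.length
instance (crosswords : List (List String)) (word : String) : Decidable (Pre_find_word_vertical crosswords word) := by unfold Pre_find_word_vertical; infer_instance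
def pvWitness_find_word_vertical : List (List String) × String :=
  ([["a", "b"], ["c", "d"]], "ac")
def Spec_find_word_vertical (crosswords : List (List String)) (word : String) (out : Option (List Int)) : Prop := out = find_word_vertical_alt crosswords word
instance (crosswords : List (List String)) (word : String) (out : Option (List Int)) : Decidable (Spec_find_word_vertical crosswords word out) := by unfold Spec_find_word_vertical; infer_instance

-- ===== CLAIM (what is proved, stated in full; the proofs are below) =====
def Claim_equal_find_word_vertical : Prop := ∀ (crosswords : List (List String)) (word : String), Dom_find_word_vertical crosswords word → Pre_find_word_vertical crosswords word → Spec_find_word_vertical crosswords word (find_word_vertical crosswords word)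

-- ===== LEMMAS AND PROOFS =====

-- a String-accumulator fold, viewed through toList, is the List-accumulator fold
theorem strfold (g : List String → String) (cw : List (List String)) :
    ∀ init : String, (cw.foldl (fun s row => s ++ g row) init).toList =
      cw.foldl (fun acc row => acc ++ (g row).toList) init.toList := by
  induction cw with
  | nil => intro init; rfl
  | cons a t ih => intro init; simp only [List.foldl_cons, ih, String.toList_append]

-- A's column string has exactly B's flattened column characters
theorem aColStr_toList (cw : List (List String)) (c : Int) :
    (aColStr cw c).toList =
      cw.foldl (fun acc row => acc ++ ((PySem.List.pyGet? row c).getD "").toList) [] := by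
  unfold aColStr
  rw [PySem.List.foldl_pyRange_zero_pyGetD' cw []
    (fun s row => s ++ (PySem.List.pyGet? row c).getD "") ""]
  exact strfold _ cw ""


-- bMatch at an in-range start is exactly "wl is a prefix of chars from there"
theorem bMatch_iff (chars wl : List Char) (k : Nat) (h : k + wl.length ≤ chars.length) :
    bMatch chars wl (k : Int) = true ↔ wl <+: chars.drop k := by
  unfold bMatch
  rw [PySem.List.pyRange_zero_natCast]
  rw [List.all_map, List.all_eq_true]
  constructor
  · intro hall
    rw [List.prefix_iff_eq_take]
    apply List.ext_getElem
    · simp; omega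
    · intro i hi1 hi2
      have hik : i < wl.length := by simpa using hi1
      have := hall i (by simpa using hik)
      simp only [Function.comp] at this
      rw [show (k : Int) + (i : Int) = ((k + i : Nat) : Int) by push_cast; ring] at this
      rw [PySem.List.pyGet?_natCast, PySem.List.pyGet?_natCast] at this
      rw [List.getElem?_eq_getElem (by omega), List.getElem?_eq_getElem hik] at this
      simp at this
      simp [List.getElem_take, List.getElem_drop, this]
  · intro hp i hi
    have hik : i < wl.length := by simpa using hi
    simp only [Function.comp]
    rw [show (k : Int) + (i : Int) = ((k + i : Nat) : Int) by push_cast; ring]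
    rw [PySem.List.pyGet?_natCast, PySem.List.pyGet?_natCast]
    rw [List.getElem?_eq_getElem (by omega), List.getElem?_eq_getElem hik]
    simp only [Option.getD_some, beq_iff_eq]
    have := hp.getElem (i := i) (by simpa using hik)
    simp only [List.getElem_drop] at this
    exact this.symm


theorem bStarts_none (chars wl : List Char) (l : List Int)
    (h : ∀ s ∈ l, bMatch chars wl s = false) : bStarts chars wl l = none := by
  induction l with
  | nil => rfl
  | cons a t ih =>
      simp only [bStarts, h a (by simp), if_false, Bool.false_eq_true]
      exact ih (fun s hs => h s (by simp [hs]))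

theorem bStarts_first (chars wl : List Char) (l1 l2 : List Int) (s : Int)
    (h1 : ∀ x ∈ l1, bMatch chars wl x = false) (h2 : bMatch chars wl s = true) :
    bStarts chars wl (l1 ++ s :: l2) = some s := by
  induction l1 with
  | nil => simp [bStarts, h2]
  | cons a t ih =>
      simp only [List.cons_append, bStarts]
      rw [if_neg (by simp [h1 a (by simp)])]
      exact ih (fun x hx => h1 x (by simp [hx]))

-- B's start scan over a column finds exactly what str.find finds
theorem col_case (chars wl : List Char) (hw : wl ≠ []) :
    bStarts chars wl (PySem.List.pyRange 0 ((chars.length : Int) - wl.length + 1) 1) =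
      if 0 ≤ PySem.Chars.find chars wl then some (PySem.Chars.find chars wl) else none := by
  by_cases hf : PySem.Chars.find chars wl = -1
  · rw [if_neg (by rw [hf]; norm_num)]
    apply bStarts_none
    intro s hs
    rw [PySem.List.mem_pyRange_one] at hs
    by_contra hb
    have hb' : bMatch chars wl s = true := by
      cases hbm : bMatch chars wl s with
      | false => exact absurd hbm hb
      | true => rfl
    have hsn : (s.toNat : Int) = s := Int.toNat_of_nonneg hs.1
    have hbound : s.toNat + wl.length ≤ chars.length := by omega
    rw [← hsn] at hb'
    rw [bMatch_iff chars wl s.toNat hbound] at hb'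
    have hinf : wl <:+: chars := hb'.isInfix.trans (List.drop_suffix s.toNat chars).isInfix
    rw [PySem.Chars.find_eq_neg_one_iff] at hf
    exact hf hinf
  · have h0 : 0 ≤ PySem.Chars.find chars wl := by
      have := PySem.Chars.neg_one_le_find chars wl
      omega
    rw [if_pos h0]
    obtain ⟨hp, hmin⟩ := PySem.Chars.find_spec (s := chars) (sub := wl) h0
    have hfn : ((PySem.Chars.find chars wl).toNat : Int) = PySem.Chars.find chars wl :=
      Int.toNat_of_nonneg h0
    have hlen : (PySem.Chars.find chars wl).toNat + wl.length ≤ chars.length := by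
      have h1 := hp.length_le
      simp only [List.length_drop] at h1
      have h2 := PySem.Chars.find_le_length chars wl
      omega
    have hwpos : 0 < wl.length := List.length_pos_iff.mpr hw
    have hlenI : PySem.Chars.find chars wl + (wl.length : Int) ≤ (chars.length : Int) := by
      rw [← hfn]; exact_mod_cast hlen
    have hflt : PySem.Chars.find chars wl < (chars.length : Int) - wl.length + 1 := by omega
    have hsplit : PySem.List.pyRange 0 ((chars.length : Int) - wl.length + 1) 1 =
        PySem.List.pyRange 0 (PySem.Chars.find chars wl) 1 ++
          PySem.Chars.find chars wl ::
            PySem.List.pyRange (PySem.Chars.find chars wl + 1) ((chars.length : Int) - wl.length + 1) 1 := by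
      rw [PySem.List.pyRange_one_append 0 (PySem.Chars.find chars wl) _ h0 (by omega),
        ← PySem.List.pyRange_one_cons hflt]
    rw [hsplit]
    apply bStarts_first
    · intro x hx
      rw [PySem.List.mem_pyRange_one] at hx
      by_contra hb
      have hb' : bMatch chars wl x = true := by
        cases hbm : bMatch chars wl x with
        | false => exact absurd hbm hb
        | true => rfl
      have hxn : (x.toNat : Int) = x := Int.toNat_of_nonneg hx.1
      have hbound : x.toNat + wl.length ≤ chars.length := by omega
      rw [← hxn, bMatch_iff chars wl x.toNat hbound] at hb'
      exact hmin x.toNat (by omega) hb'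
    · rw [← hfn, bMatch_iff chars wl _ hlen]
      exact hp


-- per-column-list equality of the two loops
theorem cols_eq (cw : List (List String)) (word : String) (hw : word ≠ "") (cols : List Int) :
    aCols cw word cols = altCols cw word.toList cols := by
  have hwl : word.toList ≠ [] := by
    intro h; apply hw; exact String.toList_eq_nil_iff.mp h
  induction cols with
  | nil => rfl
  | cons c rest ih =>
      show _ = altCols cw word.toList (c :: rest)
      unfold altCols
      simp only [← aColStr_toList cw c]
      rw [col_case _ _ hwl]
      rw [show PySem.Chars.find (aColStr cw c).toList word.toList
            = PySem.Str.find (aColStr cw c) word from (PySem.Str.find_eq _ _).symm]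
      unfold aCols
      split_ifs with h
      · simp
      · simp [ih]


-- ===== VERDICT (by name: the statement is the Claim_ definition above) =====
theorem find_word_vertical_spec : Claim_equal_find_word_vertical := by
  intro cw word _ _
  unfold Spec_find_word_vertical find_word_vertical find_word_vertical_alt
  split
  · rfl
  · next h =>
      push Not at h
      exact cols_eq cw word h.2 _
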